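-- pv_equiv track=rewrite | github.com/NeckofNickey/algorithms | search/transportation.py | can_deliver
-- ===== SOURCE A (Python) =====
-- import heapq
--
-- def can_deliver(n, edges, max_time, total_weight):
--     graph = [[] for _ in range(n + 1)]
--     for u, v, time, limit in edges:
--         if limit >= total_weight:
--             graph[u].append((v, time))
--             graph[v].append((u, time))
--
--     time_list = [float('inf')] * (n + 1)
--     time_list[1] = 0
--     pq = [(0, 1)]
--
--     while pq:
--         t, u = heapq.heappop(pq)
--         if t > time_list[u]:
--             continue
--         if u == n:
--             return t <= max_time
--         for v, time in graph[u]: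
--             nt = t + time
--             if nt < time_list[v]:
--                 time_list[v] = nt
--                 heapq.heappush(pq, (nt, v))
--
--     return False
-- ===== SOURCE B (Python) =====
-- def can_deliver(n, edges, max_time, total_weight):
--     INF = float('inf')
--     adj = [[] for _ in range(n + 1)]
--     for u, v, time, limit in edges:
--         if limit >= total_weight:
--             adj[u].append((v, time))
--             adj[v].append((u, time))
--
--     dist = [INF] * (n + 1)
--     dist[1] = 0
--     visited = [False] * (n + 1)
--
--     for _ in range(n + 1):
--         u = -1
--         for v in range(n + 1):
--             if not visited[v] and dist[v] != INF and (u == -1 or dist[v] < dist[u]):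
--                 u = v
--         if u == -1:
--             return False
--         if u == n:
--             return dist[n] <= max_time
--         visited[u] = True
--         for v, t in adj[u]:
--             if dist[u] + t < dist[v]:
--                 dist[v] = dist[u] + t
--     return False
-- ===== Notes on version B (the rewrite author's own statement) =====
-- stated objective: simpler
-- what changed: Replaces the heapq-based lazy-deletion Dijkstra with an O(V^2) array Dijkstra: a dist array plus a visited array, each round linearly scanning for the closest unvisited reachable node, with no priority queue and no stale-entry skipping.
-- outside the precondition, e.g. on can_deliver(2, [(2, 1, -2, 5), (1, 1, -1, 5), (2, 1, -1, 5)], -3, 0): A returns False, B returns True; on can_deliver(2, [(-1, 1, 3, 5)], 5, 0): A returns False, B returns True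
import Mathlib
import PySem

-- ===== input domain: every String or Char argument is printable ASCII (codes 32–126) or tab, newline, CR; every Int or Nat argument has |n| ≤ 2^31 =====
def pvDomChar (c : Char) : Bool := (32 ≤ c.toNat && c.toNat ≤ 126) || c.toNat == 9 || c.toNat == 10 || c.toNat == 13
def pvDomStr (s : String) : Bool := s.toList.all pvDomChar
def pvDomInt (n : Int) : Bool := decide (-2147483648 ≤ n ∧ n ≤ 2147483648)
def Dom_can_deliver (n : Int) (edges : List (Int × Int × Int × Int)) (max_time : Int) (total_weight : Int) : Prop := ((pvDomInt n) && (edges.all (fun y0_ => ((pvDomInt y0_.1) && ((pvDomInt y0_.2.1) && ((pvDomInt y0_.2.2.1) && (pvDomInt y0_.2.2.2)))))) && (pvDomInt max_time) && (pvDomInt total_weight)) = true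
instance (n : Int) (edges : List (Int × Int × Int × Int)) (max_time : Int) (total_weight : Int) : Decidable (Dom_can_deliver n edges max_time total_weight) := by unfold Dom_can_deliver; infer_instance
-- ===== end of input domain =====

-- B replaces A's heapq lazy-deletion Dijkstra with an O(V^2) array Dijkstra (dist + visited
-- arrays, linear min-scan per round, no priority queue); objective: simpler.

-- ===== PORT A =====
-- adjacency "list of lists" modelled as a function from vertex to its adjacency list
def pvAdjAdd (g : Int → List (Int × Int)) (u : Int) (e : Int × Int) : Int → List (Int × Int) :=
  fun x => if x = u then g u ++ [e] else g x

-- shared by both ports: both Pythons build the identical filtered adjacency structure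
def pvBuildGraph (edges : List (Int × Int × Int × Int)) (total_weight : Int) :
    Int → List (Int × Int) :=
  edges.foldl (fun g e =>
    if total_weight ≤ e.2.2.2 then
      pvAdjAdd (pvAdjAdd g e.1 (e.2.1, e.2.2.1)) e.2.1 (e.1, e.2.2.1)
    else g) (fun _ => [])

-- lexicographic order on (time, vertex) pairs: heapq pops the lexicographically least pair
def pvLexLe (a b : Int × Int) : Bool :=
  decide (a.1 < b.1 ∨ (a.1 = b.1 ∧ a.2 ≤ b.2))

def pvFindMin (m : Int × Int) : List (Int × Int) → Int × Int
  | [] => m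
  | x :: xs => pvFindMin (if pvLexLe m x then m else x) xs

-- t > time_list[u] (time_list entry none = float('inf'))
def pvStale (d : Option Int) (t : Int) : Bool :=
  match d with
  | some x => decide (x < t)
  | none => false

-- nt < time_list[v]
def pvImproves (d : Option Int) (nt : Int) : Bool :=
  match d with
  | some x => decide (nt < x)
  | none => true

-- the inner `for v, time in graph[u]` of A: updates time_list and pushes onto pq
def pvRelaxA (t : Int) (adj : List (Int × Int))
    (s : (Int → Option Int) × List (Int × Int)) : (Int → Option Int) × List (Int × Int) :=
  adj.foldl (fun s p =>
    let nt := t + p.2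
    if pvImproves (s.1 p.1) nt then
      (fun x => if x = p.1 then some nt else s.1 x, s.2 ++ [(nt, p.1)])
    else s) s

-- A's `while pq:` loop; pq as a plain list, heappop = remove the least pair (fuelled)
def pvLoopA (g : Int → List (Int × Int)) (n max_time : Int) :
    Nat → (Int → Option Int) → List (Int × Int) → Bool
  | 0, _, _ => false
  | fuel + 1, tl, pq =>
    match pq with
    | [] => false
    | x :: xs =>
      let m := pvFindMin x xs
      let pq' := (x :: xs).erase m
      if pvStale (tl m.2) m.1 then pvLoopA g n max_time fuel tl pq'
      else if m.2 = n then decide (m.1 ≤ max_time)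
      else
        let s := pvRelaxA m.1 (g m.2) (tl, pq')
        pvLoopA g n max_time fuel s.1 s.2

def can_deliver (n : Int) (edges : List (Int × Int × Int × Int)) (max_time : Int)
    (total_weight : Int) : Bool :=
  pvLoopA (pvBuildGraph edges total_weight) n max_time (1 + 2 * edges.length)
    (fun x => if x = 1 then some 0 else none) [(0, 1)]

-- ===== PORT B =====
-- the linear scan `for v in range(n+1)` picking the closest unvisited reachable vertex (-1 = none)
def pvSelectStep (dist : Int → Option Int) (visited : Int → Bool) (u : Int) (v' : Nat) : Int :=
  let v : Int := (v' : Int)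
  if visited v then u
  else
    match dist v with
    | none => u
    | some dv =>
      if u = -1 then v
      else
        match dist u with
        | some du => if dv < du then v else u
        | none => u

def pvSelect (dist : Int → Option Int) (visited : Int → Bool) (n : Int) : Int :=
  (List.range (n + 1).toNat).foldl (pvSelectStep dist visited) (-1)

-- B's inner relaxation `for v, t in adj[u]`: reads the current dist[u] each step
def pvRelaxB (u : Int) (adj : List (Int × Int)) (dist : Int → Option Int) :
    Int → Option Int :=
  adj.foldl (fun d p =>
    match d u with
    | some du =>
      let nt := du + p.2
      if pvImproves (d p.1) nt then (fun x => if x = p.1 then some nt else d x) else d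
    | none => d) dist

-- B's `for _ in range(n+1)` outer loop
def pvLoopB (g : Int → List (Int × Int)) (n max_time : Int) :
    Nat → (Int → Option Int) → (Int → Bool) → Bool
  | 0, _, _ => false
  | fuel + 1, dist, visited =>
    let u := pvSelect dist visited n
    if u = -1 then false
    else if u = n then
      match dist n with
      | some d => decide (d ≤ max_time)
      | none => false
    else
      pvLoopB g n max_time fuel (pvRelaxB u (g u) dist)
        (fun x => if x = u then true else visited x)

def can_deliver_alt (n : Int) (edges : List (Int × Int × Int × Int)) (max_time : Int)
    (total_weight : Int) : Bool :=
  pvLoopB (pvBuildGraph edges total_weight) n max_time (n + 1).toNat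
    (fun x => if x = 1 then some 0 else none) (fun _ => false)

-- ===== PRECONDITION & SPEC =====
-- Pre_ excludes: n ≤ 0 and unfiltered edges with an endpoint above n (A raises IndexError);
-- unfiltered edges with a negative endpoint (A relies on Python's accidental negative-index
-- wraparound) and unfiltered edges with negative time (Dijkstra's invariant fails: A's result
-- is an accident of heap order and A can even diverge on negative cycles).
def Pre_can_deliver (n : Int) (edges : List (Int × Int × Int × Int)) (max_time : Int)
    (total_weight : Int) : Prop :=
  1 ≤ n ∧ ∀ e ∈ edges, total_weight ≤ e.2.2.2 →
    0 ≤ e.1 ∧ e.1 ≤ n ∧ 0 ≤ e.2.1 ∧ e.2.1 ≤ n ∧ 0 ≤ e.2.2.1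

instance (n : Int) (edges : List (Int × Int × Int × Int)) (max_time : Int) (total_weight : Int) :
    Decidable (Pre_can_deliver n edges max_time total_weight) := by
  unfold Pre_can_deliver; infer_instance

def pvWitness_can_deliver : Int × (List (Int × Int × Int × Int)) × Int × Int :=
  (2, [(1, 2, 3, 10)], 5, 4)

def Spec_can_deliver (n : Int) (edges : List (Int × Int × Int × Int)) (max_time : Int) (total_weight : Int) (out : Bool) : Prop := out = can_deliver_alt n edges max_time total_weight
instance (n : Int) (edges : List (Int × Int × Int × Int)) (max_time : Int) (total_weight : Int) (out : Bool) : Decidable (Spec_can_deliver n edges max_time total_weight out) := by unfold Spec_can_deliver; infer_instance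

-- ===== CLAIM (what is proved, stated in full; the proofs are below) =====
def Claim_equal_can_deliver : Prop := ∀ (n : Int) (edges : List (Int × Int × Int × Int)) (max_time : Int) (total_weight : Int), Dom_can_deliver n edges max_time total_weight → Pre_can_deliver n edges max_time total_weight → Spec_can_deliver n edges max_time total_weight (can_deliver n edges max_time total_weight)

-- ===== LEMMAS AND PROOFS =====

-- graph well-formedness: every adjacency entry has an in-range endpoint and a nonneg time
def pvGWF (g : Int → List (Int × Int)) (n : Int) : Prop :=
  ∀ u : Int, ∀ p ∈ g u, 0 ≤ p.1 ∧ p.1 ≤ n ∧ 0 ≤ p.2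

-- the simulation invariant relating A's (time_list, pq) to B's (dist, visited); time_list = dist
def pvInv (n : Int) (dist : Int → Option Int) (visited : Int → Bool)
    (pq : List (Int × Int)) : Prop :=
  (∀ p ∈ pq, 0 ≤ p.2 ∧ p.2 ≤ n ∧ ∃ d, dist p.2 = some d ∧ d ≤ p.1) ∧
  (∀ v : Int, 0 ≤ v → v ≤ n → visited v = false → ∀ d, dist v = some d →
      pq.count (d, v) = 1) ∧
  (∀ v : Int, visited v = true → ∃ d, dist v = some d ∧
      ∀ p ∈ pq, d ≤ p.1 ∧ (p.2 = v → d < p.1))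

-- fuel measures
def pvUnvisSum (f : Nat → Nat) (visited : Int → Bool) : List Nat → Nat
  | [] => 0
  | i :: l => (if visited ((i : Nat) : Int) then 0 else f i) + pvUnvisSum f visited l

def pvUnvisDeg (n : Int) (g : Int → List (Int × Int)) (visited : Int → Bool) : Nat :=
  pvUnvisSum (fun i => (g (i : Int)).length) visited (List.range (n + 1).toNat)

def pvUnvisCnt (n : Int) (visited : Int → Bool) : Nat :=
  pvUnvisSum (fun _ => 1) visited (List.range (n + 1).toNat)

lemma pvLexLe_trans (a b c : Int × Int) (h1 : pvLexLe a b = true) (h2 : pvLexLe b c = true) :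
    pvLexLe a c = true := by
  simp only [pvLexLe, decide_eq_true_eq] at *; omega

lemma pvLexLe_not (a b : Int × Int) (h : pvLexLe a b = false) : pvLexLe b a = true := by
  simp only [pvLexLe, decide_eq_true_eq, decide_eq_false_iff_not] at *; omega

lemma pvLexLe_refl (a : Int × Int) : pvLexLe a a = true := by
  simp [pvLexLe]

lemma pvFindMin_mem (xs : List (Int × Int)) : ∀ m, pvFindMin m xs = m ∨ pvFindMin m xs ∈ xs := by
  induction xs with
  | nil => intro m; left; rfl
  | cons x xs ih =>
    intro m
    simp only [pvFindMin]
    rcases ih (if pvLexLe m x then m else x) with h | h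
    · rw [h]; split
      · left; rfl
      · right; simp
    · right; simp [h]

lemma pvFindMin_le (xs : List (Int × Int)) : ∀ m p, (p = m ∨ p ∈ xs) →
    pvLexLe (pvFindMin m xs) p = true := by
  induction xs with
  | nil =>
    intro m p hp
    rcases hp with rfl | h
    · exact pvLexLe_refl _
    · simp at h
  | cons x xs ih =>
    intro m p hp
    simp only [pvFindMin]
    have hle1 : pvLexLe (if pvLexLe m x then m else x) m = true := by
      by_cases h : pvLexLe m x = true
      · simp [h, pvLexLe_refl]
      · simp [h, pvLexLe_not _ _ (by simpa using h)]
    have hle2 : pvLexLe (if pvLexLe m x then m else x) x = true := by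
      by_cases h : pvLexLe m x = true
      · simp [h]
      · simp [h, pvLexLe_refl]
    have hres : pvLexLe (pvFindMin (if pvLexLe m x then m else x) xs)
        (if pvLexLe m x then m else x) = true := ih _ _ (Or.inl rfl)
    rcases hp with rfl | hx
    · exact pvLexLe_trans _ _ _ hres hle1
    · rcases List.mem_cons.mp hx with rfl | hx
      · exact pvLexLe_trans _ _ _ hres hle2
      · exact ih _ _ (Or.inr hx)

lemma pvSelect_inv (dist : Int → Option Int) (visited : Int → Bool) : ∀ k : Nat,
    ((List.range k).foldl (pvSelectStep dist visited) (-1) = -1 ∧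
      ∀ i : Nat, i < k → visited (i : Int) = true ∨ dist (i : Int) = none) ∨
    (∃ (i : Nat) (dr : Int), i < k ∧
      (List.range k).foldl (pvSelectStep dist visited) (-1) = (i : Int) ∧
      visited (i : Int) = false ∧ dist (i : Int) = some dr ∧
      ∀ j : Nat, j < k → visited (j : Int) = false → ∀ dj, dist (j : Int) = some dj →
        dr ≤ dj ∧ (j < i → dr < dj)) := by
  intro k
  induction k with
  | zero => exact Or.inl ⟨rfl, fun i hi => absurd hi (by omega)⟩
  | succ k ih =>
    rw [List.range_succ, List.foldl_append, List.foldl_cons, List.foldl_nil]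
    rcases ih with ⟨hr, hnone⟩ | ⟨i, dr, hik, hr, hvi, hdi, hbest⟩
    · rw [hr]
      by_cases hv : visited (k : Int) = true
      · left
        refine ⟨by simp [pvSelectStep, hv], ?_⟩
        intro i hi
        rcases Nat.lt_succ_iff_lt_or_eq.mp hi with h' | rfl
        · exact hnone i h'
        · exact Or.inl hv
      · rcases hd : dist (k : Int) with _ | dk
        · left
          refine ⟨by simp [pvSelectStep, hv, hd], ?_⟩
          intro i hi
          rcases Nat.lt_succ_iff_lt_or_eq.mp hi with h' | rfl
          · exact hnone i h'
          · exact Or.inr hd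
        · right
          refine ⟨k, dk, Nat.lt_succ_self _, by simp [pvSelectStep, hv, hd], by simpa using hv, hd, ?_⟩
          intro j hj hjv dj hdj
          rcases Nat.lt_succ_iff_lt_or_eq.mp hj with h' | rfl
          · rcases hnone j h' with h | h
            · rw [hjv] at h; exact absurd h (by simp)
            · rw [h] at hdj; exact absurd hdj (by simp)
          · rw [hd] at hdj; cases hdj
            exact ⟨le_refl _, by omega⟩
    · rw [hr]
      by_cases hv : visited (k : Int) = true
      · right
        refine ⟨i, dr, by omega, by simp [pvSelectStep, hv], hvi, hdi, ?_⟩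
        intro j hj hjv dj hdj
        rcases Nat.lt_succ_iff_lt_or_eq.mp hj with h' | rfl
        · exact hbest j h' hjv dj hdj
        · rw [hjv] at hv; exact absurd hv (by simp)
      · rcases hd : dist (k : Int) with _ | dk
        · right
          refine ⟨i, dr, by omega, by simp [pvSelectStep, hv, hd], hvi, hdi, ?_⟩
          intro j hj hjv dj hdj
          rcases Nat.lt_succ_iff_lt_or_eq.mp hj with h' | rfl
          · exact hbest j h' hjv dj hdj
          · rw [hd] at hdj; exact absurd hdj (by simp)
        · have hne : ((i : Int)) ≠ -1 := by omega
          by_cases hlt : dk < dr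
          · right
            refine ⟨k, dk, Nat.lt_succ_self _, ?_, by simpa using hv, hd, ?_⟩
            · simp only [pvSelectStep, hv, hd]
              simp [hne, hdi, hlt]
            · intro j hj hjv dj hdj
              rcases Nat.lt_succ_iff_lt_or_eq.mp hj with h' | rfl
              · have := hbest j h' hjv dj hdj
                exact ⟨by omega, fun _ => by omega⟩
              · rw [hd] at hdj; cases hdj
                exact ⟨le_refl _, by omega⟩
          · right
            refine ⟨i, dr, by omega, ?_, hvi, hdi, ?_⟩
            · simp only [pvSelectStep, hv, hd]
              simp [hne, hdi, hlt]
            · intro j hj hjv dj hdj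
              rcases Nat.lt_succ_iff_lt_or_eq.mp hj with h' | rfl
              · exact hbest j h' hjv dj hdj
              · rw [hd] at hdj; cases hdj
                exact ⟨by omega, by omega⟩

lemma pvSelect_none (dist : Int → Option Int) (visited : Int → Bool) (n : Int)
    (h : ∀ v : Int, 0 ≤ v → v ≤ n → visited v = false → dist v = none) :
    pvSelect dist visited n = -1 := by
  unfold pvSelect
  rcases pvSelect_inv dist visited (n + 1).toNat with ⟨hr, _⟩ | ⟨i, dr, hik, hr, hvi, hdi, _⟩
  · exact hr
  · have h0 : (0 : Int) ≤ (i : Int) := by omega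
    have h1 : (i : Int) ≤ n := by omega
    rw [h (i : Int) h0 h1 hvi] at hdi
    exact absurd hdi (by simp)

lemma pvSelect_eq (dist : Int → Option Int) (visited : Int → Bool) (n u du : Int)
    (hu0 : 0 ≤ u) (hun : u ≤ n) (huv : visited u = false) (hdu : dist u = some du)
    (hmin : ∀ v : Int, 0 ≤ v → v ≤ n → visited v = false → ∀ dv, dist v = some dv →
      du < dv ∨ (du = dv ∧ u ≤ v)) :
    pvSelect dist visited n = u := by
  unfold pvSelect
  have huk : u.toNat < (n + 1).toNat := by omega
  have hcast : ((u.toNat : Nat) : Int) = u := by omega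
  rcases pvSelect_inv dist visited (n + 1).toNat with ⟨_, hnone⟩ | ⟨i, dr, hik, hr, hvi, hdi, hbest⟩
  · rcases hnone u.toNat huk with h | h
    · rw [hcast] at h; rw [huv] at h; exact absurd h (by simp)
    · rw [hcast] at h; rw [hdu] at h; exact absurd h (by simp)
  · have hub := hbest u.toNat huk (by rwa [hcast]) du (by rwa [hcast])
    have h0 : (0 : Int) ≤ (i : Int) := by omega
    have h1 : (i : Int) ≤ n := by omega
    rcases hmin (i : Int) h0 h1 hvi dr hdi with hlt | ⟨heq, hle⟩
    · omega
    · have : u.toNat ≤ i := by omega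
      have : ¬ (u.toNat < i) := by
        intro hc
        have := hub.2 hc
        omega
      have : i = u.toNat := by omega
      rw [hr, this, hcast]

lemma pvUnvisSum_congr (f : Nat → Nat) (v1 v2 : Int → Bool) :
    ∀ l : List Nat, (∀ i ∈ l, v1 ((i : Nat) : Int) = v2 ((i : Nat) : Int)) →
      pvUnvisSum f v1 l = pvUnvisSum f v2 l := by
  intro l
  induction l with
  | nil => intro _; rfl
  | cons a l ih =>
    intro h
    simp only [pvUnvisSum]
    rw [h a (List.mem_cons_self), ih (fun i hi => h i (List.mem_cons_of_mem _ hi))]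

lemma pvUnvisSum_false (f : Nat → Nat) :
    ∀ l : List Nat, pvUnvisSum f (fun _ => false) l = (l.map f).sum := by
  intro l
  induction l with
  | nil => rfl
  | cons a l ih => simp [pvUnvisSum, ih]

lemma pvUnvisSum_update (f : Nat → Nat) (visited : Int → Bool) (u : Int)
    (hu0 : 0 ≤ u) (huv : visited u = false) :
    ∀ l : List Nat, l.Nodup → u.toNat ∈ l →
      pvUnvisSum f visited l
        = pvUnvisSum f (fun x => if x = u then true else visited x) l + f u.toNat := by
  intro l
  induction l with
  | nil => intro _ h; simp at h
  | cons a l ih =>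
    intro hnd hmem
    have hnd' := List.nodup_cons.mp hnd
    simp only [pvUnvisSum]
    by_cases hau : a = u.toNat
    · have hcast : ((a : Nat) : Int) = u := by omega
      have htail : pvUnvisSum f visited l
          = pvUnvisSum f (fun x => if x = u then true else visited x) l := by
        apply pvUnvisSum_congr
        intro i hi
        have : ((i : Nat) : Int) ≠ u := by
          intro hc
          have : i = a := by omega
          subst this
          exact hnd'.1 hi
        simp [this]
      rw [htail, hcast]
      simp only [huv, Bool.false_eq_true, if_false, if_true, hau]
      omega
    · have hne : ((a : Nat) : Int) ≠ u := by omega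
      have hmem' : u.toNat ∈ l := by
        rcases List.mem_cons.mp hmem with h | h
        · exact absurd h.symm hau
        · exact h
      rw [ih hnd'.2 hmem']
      simp only [hne, if_false]
      omega

lemma pvAdjAdd_wf (g : Int → List (Int × Int)) (n u : Int) (e : Int × Int)
    (hg : pvGWF g n) (h1 : 0 ≤ e.1) (h2 : e.1 ≤ n) (h3 : 0 ≤ e.2) :
    pvGWF (pvAdjAdd g u e) n := by
  intro x p hp
  unfold pvAdjAdd at hp
  split at hp
  · rcases List.mem_append.mp hp with h | h
    · exact hg _ _ h
    · simp at h; subst h; exact ⟨h1, h2, h3⟩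
  · exact hg _ _ hp

lemma pvBuildGraph_wf_aux (n total_weight : Int) :
    ∀ (edges : List (Int × Int × Int × Int)) (g0 : Int → List (Int × Int)),
      pvGWF g0 n →
      (∀ e ∈ edges, total_weight ≤ e.2.2.2 →
        0 ≤ e.1 ∧ e.1 ≤ n ∧ 0 ≤ e.2.1 ∧ e.2.1 ≤ n ∧ 0 ≤ e.2.2.1) →
      pvGWF (edges.foldl (fun g e =>
        if total_weight ≤ e.2.2.2 then
          pvAdjAdd (pvAdjAdd g e.1 (e.2.1, e.2.2.1)) e.2.1 (e.1, e.2.2.1)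
        else g) g0) n := by
  intro edges
  induction edges with
  | nil => intro g0 hg _; exact hg
  | cons e es ih =>
    intro g0 hg he
    rw [List.foldl_cons]
    apply ih
    · split
      · rename_i hkeep
        obtain ⟨a1, a2, a3, a4, a5⟩ := he e (List.mem_cons_self) hkeep
        exact pvAdjAdd_wf _ _ _ _ (pvAdjAdd_wf _ _ _ _ hg a3 a4 a5) a1 a2 a5
      · exact hg
    · intro e' he' hk
      exact he e' (List.mem_cons_of_mem _ he') hk

lemma pvBuildGraph_wf (n total_weight : Int) (edges : List (Int × Int × Int × Int))
    (he : ∀ e ∈ edges, total_weight ≤ e.2.2.2 →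
      0 ≤ e.1 ∧ e.1 ≤ n ∧ 0 ≤ e.2.1 ∧ e.2.1 ≤ n ∧ 0 ≤ e.2.2.1) :
    pvGWF (pvBuildGraph edges total_weight) n := by
  exact pvBuildGraph_wf_aux n total_weight edges _ (fun u p hp => by simp at hp) he

lemma pvMsum_adjAdd (g : Int → List (Int × Int)) (u : Int) (e : Int × Int) :
    ∀ l : List Nat, l.Nodup →
      (l.map fun i : Nat => ((pvAdjAdd g u e) ((i : Nat) : Int)).length).sum
        ≤ (l.map fun i : Nat => (g ((i : Nat) : Int)).length).sum + 1 := by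
  intro l
  induction l with
  | nil => simp
  | cons a l ih =>
    intro hnd
    have hnd' := List.nodup_cons.mp hnd
    simp only [List.map_cons, List.sum_cons]
    by_cases hau : ((a : Nat) : Int) = u
    · have htail : (l.map fun i : Nat => ((pvAdjAdd g u e) ((i : Nat) : Int)).length).sum
          = (l.map fun i : Nat => (g ((i : Nat) : Int)).length).sum := by
        apply congrArg
        apply List.map_congr_left
        intro i hi
        have : ((i : Nat) : Int) ≠ u := by
          intro hc
          have : i = a := by omega
          subst this; exact hnd'.1 hi
        simp [pvAdjAdd, this]
      rw [htail]
      have hhead : ((pvAdjAdd g u e) ((a : Nat) : Int)).length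
          = (g ((a : Nat) : Int)).length + 1 := by
        rw [hau]; simp [pvAdjAdd]
      omega
    · have hhead : ((pvAdjAdd g u e) ((a : Nat) : Int)).length = (g ((a : Nat) : Int)).length := by
        simp [pvAdjAdd, hau]
      rw [hhead]
      have := ih hnd'.2
      omega

lemma pvBuildGraph_deg_aux (total_weight : Int) (l : List Nat) (hnd : l.Nodup) :
    ∀ (edges : List (Int × Int × Int × Int)) (g0 : Int → List (Int × Int)),
      (l.map fun i : Nat => ((edges.foldl (fun g e =>
        if total_weight ≤ e.2.2.2 then
          pvAdjAdd (pvAdjAdd g e.1 (e.2.1, e.2.2.1)) e.2.1 (e.1, e.2.2.1)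
        else g) g0) ((i : Nat) : Int)).length).sum
        ≤ (l.map fun i : Nat => (g0 ((i : Nat) : Int)).length).sum + 2 * edges.length := by
  intro edges
  induction edges with
  | nil => intro g0; simp
  | cons e es ih =>
    intro g0
    rw [List.foldl_cons]
    calc _ ≤ (l.map fun i : Nat => ((if total_weight ≤ e.2.2.2 then
          pvAdjAdd (pvAdjAdd g0 e.1 (e.2.1, e.2.2.1)) e.2.1 (e.1, e.2.2.1)
        else g0) ((i : Nat) : Int)).length).sum + 2 * es.length := ih _
      _ ≤ (l.map fun i : Nat => (g0 ((i : Nat) : Int)).length).sum + 2 * (e :: es).length := by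
          split
          · have h1 := pvMsum_adjAdd (pvAdjAdd g0 e.1 (e.2.1, e.2.2.1)) e.2.1
              (e.1, e.2.2.1) l hnd
            have h2 := pvMsum_adjAdd g0 e.1 (e.2.1, e.2.2.1) l hnd
            simp only [List.length_cons]
            omega
          · simp only [List.length_cons]
            omega

lemma pvBuildGraph_deg (n total_weight : Int) (edges : List (Int × Int × Int × Int)) :
    pvUnvisDeg n (pvBuildGraph edges total_weight) (fun _ => false) ≤ 2 * edges.length := by
  unfold pvUnvisDeg pvBuildGraph
  rw [pvUnvisSum_false]
  have := pvBuildGraph_deg_aux total_weight (List.range (n + 1).toNat)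
    (List.nodup_range) edges (fun _ => [])
  simpa using this

lemma pvInv_relax_step (n : Int) (dist : Int → Option Int) (visited : Int → Bool)
    (pq : List (Int × Int)) (v nt : Int)
    (hinv : pvInv n dist visited pq)
    (hv0 : 0 ≤ v) (hvn : v ≤ n)
    (hvis : visited v = false)
    (himp : pvImproves (dist v) nt = true)
    (hbd : ∀ w : Int, visited w = true → ∃ d, dist w = some d ∧ d ≤ nt) :
    pvInv n (fun x => if x = v then some nt else dist x) visited (pq ++ [(nt, v)]) := by
  obtain ⟨hb, hc, hv⟩ := hinv
  refine ⟨?_, ?_, ?_⟩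
  · intro p hp
    rcases List.mem_append.mp hp with hp | hp
    · obtain ⟨h1, h2, d, hd, hdle⟩ := hb p hp
      by_cases hpv : p.2 = v
      · refine ⟨h1, h2, nt, by simp [hpv], ?_⟩
        rw [hpv] at hd
        rw [hd] at himp
        simp only [pvImproves, decide_eq_true_eq] at himp
        omega
      · exact ⟨h1, h2, d, by simp [hpv, hd], hdle⟩
    · simp at hp
      subst hp
      exact ⟨hv0, hvn, nt, by simp, le_refl _⟩
  · intro w hw0 hwn hwv d hd
    by_cases hwv' : w = v
    · subst hwv'
      simp only [if_pos rfl] at hd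
      cases hd
      rw [List.count_append]
      have hnm : (nt, w) ∉ pq := by
        intro hmem
        obtain ⟨_, _, d', hd', hdle'⟩ := hb _ hmem
        simp only at hd'
        rw [hd'] at himp
        simp only [pvImproves, decide_eq_true_eq] at himp
        omega
      rw [List.count_eq_zero.mpr hnm]
      simp
    · simp only [if_neg hwv'] at hd
      rw [List.count_append]
      have : List.count (d, w) [(nt, v)] = 0 := by
        apply List.count_eq_zero.mpr
        simp
        intro _ h
        exact absurd h hwv'
      rw [this, hc w hw0 hwn hwv d hd]
  · intro w hw
    have hwv : w ≠ v := by
      intro hc'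
      rw [hc'] at hw
      rw [hw] at hvis
      exact absurd hvis (by simp)
    obtain ⟨d, hd, hp⟩ := hv w hw
    obtain ⟨d2, hd2, hle2⟩ := hbd w hw
    rw [hd] at hd2
    cases hd2
    refine ⟨d, by simp [hwv, hd], ?_⟩
    intro p hpm
    rcases List.mem_append.mp hpm with hpm | hpm
    · exact hp p hpm
    · simp at hpm
      subst hpm
      exact ⟨hle2, fun (h : _ = w) => absurd h.symm hwv⟩

lemma pvRelax_sim (g : Int → List (Int × Int)) (n : Int) (hg : pvGWF g n) (u t : Int) :
    ∀ l : List (Int × Int), (∀ p ∈ l, 0 ≤ p.1 ∧ p.1 ≤ n ∧ 0 ≤ p.2) →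
    ∀ (dist : Int → Option Int) (visited : Int → Bool) (pq : List (Int × Int)),
      visited u = true → dist u = some t →
      pvInv n dist visited pq →
      (∀ w : Int, visited w = true → ∃ d, dist w = some d ∧ d ≤ t) →
      (pvRelaxA t l (dist, pq)).1 = pvRelaxB u l dist ∧
      pvInv n (pvRelaxA t l (dist, pq)).1 visited (pvRelaxA t l (dist, pq)).2 ∧
      (pvRelaxA t l (dist, pq)).2.length ≤ pq.length + l.length := by
  intro l
  induction l with
  | nil =>
    intro _ dist visited pq _ _ hinv _
    exact ⟨rfl, hinv, by simp [pvRelaxA]⟩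
  | cons p l ih =>
    intro hl dist visited pq hvu hdu hinv hbd
    obtain ⟨hp1, hp2, hp3⟩ := hl p (List.mem_cons_self)
    have hAcons : pvRelaxA t (p :: l) (dist, pq)
        = pvRelaxA t l (if pvImproves (dist p.1) (t + p.2) then
            (fun x => if x = p.1 then some (t + p.2) else dist x, pq ++ [(t + p.2, p.1)])
          else (dist, pq)) := by
      simp only [pvRelaxA, List.foldl_cons]
    have hBcons : pvRelaxB u (p :: l) dist
        = pvRelaxB u l (if pvImproves (dist p.1) (t + p.2) then
            (fun x => if x = p.1 then some (t + p.2) else dist x) else dist) := by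
      simp only [pvRelaxB, List.foldl_cons, hdu]
    by_cases himp : pvImproves (dist p.1) (t + p.2) = true
    · rw [hAcons, hBcons, if_pos himp, if_pos himp]
      have hpv : visited p.1 = false := by
        cases hvis : visited p.1
        · rfl
        · obtain ⟨d, hd, hle⟩ := hbd p.1 hvis
          rw [hd] at himp
          simp only [pvImproves, decide_eq_true_eq] at himp
          omega
      have hpu : p.1 ≠ u := by
        intro hc
        rw [hc] at hpv
        rw [hpv] at hvu
        exact absurd hvu (by simp)
      have hbd' : ∀ w : Int, visited w = true → ∃ d, dist w = some d ∧ d ≤ t + p.2 := by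
        intro w hw
        obtain ⟨d, hd, hle⟩ := hbd w hw
        exact ⟨d, hd, by omega⟩
      have hinv' := pvInv_relax_step n dist visited pq p.1 (t + p.2) hinv hp1 hp2 hpv himp hbd'
      have hdu' : (fun x => if x = p.1 then some (t + p.2) else dist x) u = some t := by
        simp only [if_neg (fun (h : u = p.1) => hpu h.symm)]
        exact hdu
      have hbd'' : ∀ w : Int, visited w = true →
          ∃ d, (fun x => if x = p.1 then some (t + p.2) else dist x) w = some d ∧ d ≤ t := by
        intro w hw
        obtain ⟨d, hd, hle⟩ := hbd w hw
        have hwp : w ≠ p.1 := by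
          intro hc
          rw [hc] at hw
          rw [hw] at hpv
          exact absurd hpv (by simp)
        exact ⟨d, by simp [hwp, hd], hle⟩
      obtain ⟨h1, h2, h3⟩ := ih (fun q hq => hl q (List.mem_cons_of_mem _ hq))
        (fun x => if x = p.1 then some (t + p.2) else dist x) visited
        (pq ++ [(t + p.2, p.1)]) hvu hdu' hinv' hbd''
      refine ⟨h1, h2, ?_⟩
      simp only [List.length_append, List.length_cons, List.length_nil] at h3 ⊢
      omega
    · rw [hAcons, hBcons, if_neg himp, if_neg himp]
      obtain ⟨h1, h2, h3⟩ := ih (fun q hq => hl q (List.mem_cons_of_mem _ hq))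
        dist visited pq hvu hdu hinv hbd
      refine ⟨h1, h2, ?_⟩
      simp only [List.length_cons] at h3 ⊢
      omega

lemma pvLoopB_false (g : Int → List (Int × Int)) (n max_time : Int) (fb : Nat)
    (dist : Int → Option Int) (visited : Int → Bool)
    (h : ∀ v : Int, 0 ≤ v → v ≤ n → visited v = false → dist v = none) :
    pvLoopB g n max_time fb dist visited = false := by
  cases fb with
  | zero => rfl
  | succ fb =>
    simp only [pvLoopB, pvSelect_none dist visited n h, reduceIte]

lemma pvUnvisSum_pos (visited : Int → Bool) (i : Nat) :
    ∀ l : List Nat, i ∈ l → visited ((i : Nat) : Int) = false →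
      1 ≤ pvUnvisSum (fun _ => 1) visited l := by
  intro l
  induction l with
  | nil => intro h; simp at h
  | cons a l ih =>
    intro hmem hvi
    simp only [pvUnvisSum]
    rcases List.mem_cons.mp hmem with rfl | hmem'
    · rw [hvi]
      simp
    · have := ih hmem' hvi; omega

lemma pvSim (g : Int → List (Int × Int)) (n max_time : Int) (hg : pvGWF g n) :
    ∀ (fa fb : Nat) (dist : Int → Option Int) (visited : Int → Bool)
      (pq : List (Int × Int)),
      pvInv n dist visited pq →
      pq.length + pvUnvisDeg n g visited ≤ fa →
      pvUnvisCnt n visited ≤ fb →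
      pvLoopA g n max_time fa dist pq = pvLoopB g n max_time fb dist visited := by
  intro fa
  induction fa with
  | zero =>
    intro fb dist visited pq hinv hfa hfb
    have hpq : pq = [] := by
      cases pq with
      | nil => rfl
      | cons x xs => simp at hfa
    subst hpq
    rw [pvLoopB_false g n max_time fb dist visited ?_]
    · rfl
    · intro v hv0 hvn hvv
      cases hd : dist v with
      | none => rfl
      | some d =>
        have := hinv.2.1 v hv0 hvn hvv d hd
        simp at this
  | succ fa ih =>
    intro fb dist visited pq hinv hfa hfb
    cases pq with
    | nil =>
      rw [pvLoopB_false g n max_time fb dist visited ?_]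
      · rfl
      · intro v hv0 hvn hvv
        cases hd : dist v with
        | none => rfl
        | some d =>
          have := hinv.2.1 v hv0 hvn hvv d hd
          simp at this
    | cons x xs =>
      have hmmem : pvFindMin x xs ∈ x :: xs := by
        rcases pvFindMin_mem xs x with h | h
        · rw [h]; exact List.mem_cons_self
        · exact List.mem_cons_of_mem _ h
      set m := pvFindMin x xs with hm
      obtain ⟨hm0, hmn, dm, hdm, hdmle⟩ := hinv.1 m hmmem
      have herasel : ((x :: xs).erase m).length = (x :: xs).length - 1 :=
        List.length_erase_of_mem hmmem
      by_cases hstale : pvStale (dist m.2) m.1 = true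
      · -- stale pop: A skips it, B's state is untouched
        have hlt : dm < m.1 := by
          rw [hdm] at hstale
          simpa [pvStale] using hstale
        have hA : pvLoopA g n max_time (fa + 1) dist (x :: xs)
            = pvLoopA g n max_time fa dist ((x :: xs).erase m) := by
          simp only [pvLoopA, ← hm, hstale, reduceIte]
        rw [hA]
        apply ih fb dist visited _ ?_ ?_ hfb
        · obtain ⟨hb, hc, hv⟩ := hinv
          refine ⟨?_, ?_, ?_⟩
          · intro p hp; exact hb p (List.mem_of_mem_erase hp)
          · intro v hv0 hvn hvv d hd
            have hne : (d, v) ≠ m := by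
              intro hc'
              have : dist m.2 = some m.1 := by rw [← hc']; exact hd
              rw [hdm] at this
              cases this
              omega
            rw [List.count_erase_of_ne hne]
            exact hc v hv0 hvn hvv d hd
          · intro v hvv
            obtain ⟨d, hd, hp⟩ := hv v hvv
            exact ⟨d, hd, fun p hp' => hp p (List.mem_of_mem_erase hp')⟩
        · rw [herasel]
          simp only [List.length_cons] at hfa ⊢
          omega
      · -- effective pop: m.1 = dist m.2 and m.2 is exactly B's selection
        have hstaleF : pvStale (dist m.2) m.1 = false := by
          cases h : pvStale (dist m.2) m.1
          · rfl
          · exact absurd h hstale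
        have heq : m.1 = dm := by
          rw [hdm] at hstaleF
          simp only [pvStale, decide_eq_false_iff_not] at hstaleF
          omega
        have hmvis : visited m.2 = false := by
          cases hvis : visited m.2
          · rfl
          · obtain ⟨d, hd, hp⟩ := hinv.2.2 m.2 hvis
            rw [hdm] at hd
            cases hd
            have := (hp m hmmem).2 rfl
            omega
        have hsel : pvSelect dist visited n = m.2 := by
          apply pvSelect_eq dist visited n m.2 dm hm0 hmn hmvis hdm
          intro v hv0 hvn hvv dv hdv
          have hcnt := hinv.2.1 v hv0 hvn hvv dv hdv
          have hmem' : (dv, v) ∈ x :: xs := by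
            rw [← List.count_pos_iff]
            omega
          have := pvFindMin_le xs x (dv, v) (by
            rcases List.mem_cons.mp hmem' with h | h
            · exact Or.inl h
            · exact Or.inr h)
          rw [← hm] at this
          simp only [pvLexLe, decide_eq_true_eq] at this
          rw [heq] at this
          exact this
        have hcntpos : 1 ≤ pvUnvisCnt n visited := by
          apply pvUnvisSum_pos visited m.2.toNat
          · rw [List.mem_range]; omega
          · have : ((m.2.toNat : Nat) : Int) = m.2 := by omega
            rw [this]; exact hmvis
        cases fb with
        | zero => omega
        | succ fb =>
          have hB : pvLoopB g n max_time (fb + 1) dist visited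
              = (if m.2 = -1 then false
                 else if m.2 = n then
                   match dist n with
                   | some d => decide (d ≤ max_time)
                   | none => false
                 else pvLoopB g n max_time fb (pvRelaxB m.2 (g m.2) dist)
                   (fun x => if x = m.2 then true else visited x)) := by
            simp only [pvLoopB, hsel]
          rw [hB, if_neg (by omega : ¬ m.2 = -1)]
          by_cases hmn' : m.2 = n
          · have hA : pvLoopA g n max_time (fa + 1) dist (x :: xs)
                = decide (m.1 ≤ max_time) := by
              simp only [pvLoopA, ← hm, hstaleF, Bool.false_eq_true, reduceIte]
              simp [hmn']
            rw [hA, if_pos hmn', ← hmn', hdm, heq]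
          · have hA : pvLoopA g n max_time (fa + 1) dist (x :: xs)
                = pvLoopA g n max_time fa
                    (pvRelaxA m.1 (g m.2) (dist, (x :: xs).erase m)).1
                    (pvRelaxA m.1 (g m.2) (dist, (x :: xs).erase m)).2 := by
              simp only [pvLoopA, ← hm, hstaleF, Bool.false_eq_true, reduceIte]
              rw [if_neg hmn']
            rw [hA, if_neg hmn']
            set visited' : Int → Bool := fun y => if y = m.2 then true else visited y with hv'
            have hmeq : m = (dm, m.2) := by
              rw [← heq]
            have hcntm := hinv.2.1 m.2 hm0 hmn hmvis dm hdm
            have hmnotin : m ∉ (x :: xs).erase m := by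
              have : ((x :: xs).erase m).count m = (x :: xs).count m - 1 :=
                List.count_erase_self
              rw [← hmeq] at hcntm
              intro hmem'
              rw [← List.count_pos_iff] at hmem'
              omega
            have hinv' : pvInv n dist visited' ((x :: xs).erase m) := by
              obtain ⟨hb, hc, hv⟩ := hinv
              refine ⟨?_, ?_, ?_⟩
              · intro p hp; exact hb p (List.mem_of_mem_erase hp)
              · intro v hv0 hvn hvv d hd
                have hvm : v ≠ m.2 := by
                  intro hc'
                  rw [hv'] at hvv
                  simp only [hc', if_pos rfl] at hvv
                  exact absurd hvv (by simp)
                have hne : (d, v) ≠ m := by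
                  intro hc'
                  apply hvm
                  rw [← hc']
                have hvv' : visited v = false := by
                  rw [hv'] at hvv
                  simpa [hvm] using hvv
                rw [List.count_erase_of_ne hne]
                exact hc v hv0 hvn hvv' d hd
              · intro v hvv
                by_cases hvm : v = m.2
                · subst hvm
                  refine ⟨dm, hdm, ?_⟩
                  intro p hp
                  have hple := pvFindMin_le xs x p (by
                    rcases List.mem_cons.mp (List.mem_of_mem_erase hp) with h | h
                    · exact Or.inl h
                    · exact Or.inr h)
                  rw [← hm] at hple
                  simp only [pvLexLe, decide_eq_true_eq] at hple
                  constructor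
                  · omega
                  · intro hpv
                    have hpne : p ≠ m := fun hc' => hmnotin (hc' ▸ hp)
                    have : p.1 ≠ dm := by
                      intro hc'
                      apply hpne
                      rw [hmeq]
                      exact Prod.ext hc' hpv
                    omega
                · have hvv' : visited v = true := by
                    rw [hv'] at hvv
                    simpa [hvm] using hvv
                  obtain ⟨d, hd, hp⟩ := hv v hvv'
                  exact ⟨d, hd, fun p hp' => hp p (List.mem_of_mem_erase hp')⟩
            have hbd : ∀ w : Int, visited' w = true → ∃ d, dist w = some d ∧ d ≤ m.1 := by
              intro w hw
              by_cases hwm : w = m.2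
              · subst hwm; exact ⟨dm, hdm, by omega⟩
              · have hw' : visited w = true := by
                  rw [hv'] at hw
                  simpa [hwm] using hw
                obtain ⟨d, hd, hp⟩ := hinv.2.2 w hw'
                exact ⟨d, hd, (hp m hmmem).1⟩
            have hvu' : visited' m.2 = true := by simp [hv']
            obtain ⟨hR1, hR2, hR3⟩ := pvRelax_sim g n hg m.2 m.1 (g m.2) (hg m.2)
              dist visited' ((x :: xs).erase m) hvu' (by rw [hdm, heq]) hinv' hbd
            rw [← hR1]
            have hm2nat : ((m.2.toNat : Nat) : Int) = m.2 := by omega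
            have hmrange : m.2.toNat ∈ List.range (n + 1).toNat := by
              rw [List.mem_range]; omega
            have hdeg := pvUnvisSum_update (fun i => (g ((i : Nat) : Int)).length)
              visited m.2 hm0 hmvis (List.range (n + 1).toNat) List.nodup_range hmrange
            have hcnt := pvUnvisSum_update (fun _ => 1)
              visited m.2 hm0 hmvis (List.range (n + 1).toNat) List.nodup_range hmrange
            simp only [hm2nat] at hdeg
            apply ih fb _ visited' _ hR2 ?_ ?_
            · have h1 : pvUnvisDeg n g visited
                  = pvUnvisDeg n g visited' + (g m.2).length := hdeg
              simp only [List.length_cons] at hfa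
              rw [herasel] at hR3
              simp only [List.length_cons] at hR3
              omega
            · have h2 : pvUnvisCnt n visited = pvUnvisCnt n visited' + 1 := hcnt
              omega

lemma pvUnvisCnt_init (n : Int) : pvUnvisCnt n (fun _ => false) = (n + 1).toNat := by
  unfold pvUnvisCnt
  have h : ∀ l : List Nat, pvUnvisSum (fun _ => 1) (fun _ => false) l = l.length := by
    intro l
    induction l with
    | nil => rfl
    | cons a l ih => simp [pvUnvisSum, ih]; omega
  rw [h, List.length_range]

-- ===== VERDICT (by name: the statement is the Claim_ definition above) =====
theorem can_deliver_spec : Claim_equal_can_deliver := by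
  unfold Claim_equal_can_deliver
  intro n edges max_time total_weight _ hpre
  obtain ⟨hn, hedges⟩ := hpre
  unfold Spec_can_deliver can_deliver can_deliver_alt
  apply pvSim (pvBuildGraph edges total_weight) n max_time
    (pvBuildGraph_wf n total_weight edges hedges)
  · refine ⟨?_, ?_, ?_⟩
    · intro p hp
      simp only [List.mem_singleton] at hp
      subst hp
      exact ⟨by omega, by omega, 0, by simp, le_refl _⟩
    · intro v hv0 hvn hvv d hd
      by_cases hv1 : v = 1
      · subst hv1
        simp only [if_pos rfl] at hd
        cases hd
        simp
      · simp only [if_neg hv1] at hd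
        exact absurd hd (by simp)
    · intro v hv
      exact absurd hv (by simp)
  · have := pvBuildGraph_deg n total_weight edges
    simp only [List.length_singleton]
    omega
  · rw [pvUnvisCnt_init]
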